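-- pv_equiv track=rewrite | github.com/binayuchai/DSA-practice- | String_python/Find largest word in dictionary by deleting some characters of given string/bruteForce2.py | largest_word
-- ===== SOURCE A (Python) =====
-- def isSequence(str1,str2):
--
--     a = len(str1)
--     b = len(str2)
--
--     i =0
--     j=0
--
--     while i < a and j < b:
--
--         if str1[i] == str2[j]:
--             i = i + 1
--         else:
--             j = j + 1
--
--     if i == a:
--         return True
--     return False
--
-- def largest_word(dict,str):
--     maxCount = 0
--     result = ""
--
--     for i in dict:
--
--         if maxCount < len(i) and isSequence(i,str):
--             result = i
--             maxCount = len(i)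
--
--     return result
-- ===== SOURCE B (Python) =====
-- def is_subseq(word, s):
--     it = iter(s)
--     return all(c in it for c in word)
--
--
-- def largest_word(dict, str):
--     max_len = 0
--     for w in dict:
--         if len(w) > max_len:
--             max_len = len(w)
--     for L in range(max_len, 0, -1):
--         for w in dict:
--             if len(w) == L and is_subseq(w, str):
--                 return w
--     return ""
-- ===== Notes on version B (the rewrite author's own statement) =====
-- stated objective: alternative
-- what changed: B replaces A's running-max scan with a length-descending search (try each target length from the maximum down and return the first dictionary word of that length that matches) and replaces A's two-pointer match test, which lets adjacent equal characters of a word reuse one position of str, by a true subsequence test via Python's iterator idiom (it = iter(str); all(c in it for c in word)).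
-- intended difference: On inputs where some word that A's reuse-tolerant test accepts but that is not a true subsequence of str outranks (longer, or equally long and earlier) every true-subsequence word, A returns that non-subsequence word (e.g. largest_word(['aa'],'a') == 'aa') while B returns the best true-subsequence word (here ''), which is the intended result of 'largest word obtained by deleting some characters of str'. — e.g. on largest_word(["aa"], "a"): A returns "aa", B returns ""
import Mathlib
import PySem

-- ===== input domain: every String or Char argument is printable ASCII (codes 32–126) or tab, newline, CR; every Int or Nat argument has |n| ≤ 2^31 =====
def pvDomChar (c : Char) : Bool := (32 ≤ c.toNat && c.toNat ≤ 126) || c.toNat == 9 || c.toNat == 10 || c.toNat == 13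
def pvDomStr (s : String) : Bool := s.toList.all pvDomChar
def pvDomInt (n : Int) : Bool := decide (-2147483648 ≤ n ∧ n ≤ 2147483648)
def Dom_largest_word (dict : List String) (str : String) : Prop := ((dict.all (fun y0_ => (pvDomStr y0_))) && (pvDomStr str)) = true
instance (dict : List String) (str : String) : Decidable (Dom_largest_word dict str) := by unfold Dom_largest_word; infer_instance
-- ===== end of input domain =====

-- B replaces A's running-max scan and its reuse-buggy two-pointer subsequence test by a
-- length-descending search with a true subsequence test (objective: alternative; B's match
-- test is the intended subsequence relation, see D_ below).

-- ===== PORT A =====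
-- the while-loop of isSequence, over the two strings' character lists; state = the indices (i, j)
def isSequenceGo (l1 l2 : List Char) (a b i j : Nat) : Bool :=
  if i < a ∧ j < b then
    if l1.getD i ' ' = l2.getD j ' ' then isSequenceGo l1 l2 a b (i + 1) j
    else isSequenceGo l1 l2 a b i (j + 1)
  else decide (i = a)
termination_by (a - i) + (b - j)
decreasing_by all_goals omega

def isSequence (str1 str2 : String) : Bool :=
  isSequenceGo str1.toList str2.toList str1.toList.length str2.toList.length 0 0

def largest_word (dict : List String) (str : String) : String :=
  (dict.foldl
    (fun (st : Nat × String) i =>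
      if st.1 < i.toList.length ∧ isSequence i str then (i.toList.length, i) else st)
    (0, "")).2

-- ===== PORT B =====
-- Source B's is_subseq: the greedy iterator test `it = iter(s); all(c in it for c in word)`
def subCheck : List Char → List Char → Bool
  | [], _ => true
  | _ :: _, [] => false
  | c :: cs, d :: ds => if c = d then subCheck cs ds else subCheck (c :: cs) ds
termination_by structural w s => s

def is_subseq (word s : String) : Bool := subCheck word.toList s.toList

-- Source B's inner `for w in dict: if len(w) == L and is_subseq(w, str): return w`
def findAt : List String → String → Nat → Option String
  | [], _, _ => none
  | w :: ws, s, L => if w.toList.length = L ∧ is_subseq w s then some w else findAt ws s L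

-- Source B's outer `for L in range(max_len, 0, -1)` with its early return
def searchDown (dict : List String) (s : String) : Nat → String
  | 0 => ""
  | L + 1 =>
    match findAt dict s (L + 1) with
    | some w => w
    | none => searchDown dict s L

def largest_word_alt (dict : List String) (str : String) : String :=
  searchDown dict str
    (dict.foldl (fun m w => if w.toList.length > m then w.toList.length else m) 0)

-- ===== PRECONDITION & SPEC =====
-- A's two-pointer test never advances j on a match, so adjacent equal characters of a word may
-- reuse a single position of str (it accepts "aa" inside "a"); on inputs where such a
-- reuse-only word outranks (longer, or equally long and earlier) every true-subsequence word,
-- A returns that non-subsequence word while B returns the best true-subsequence word (or ""),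
-- which is the intended behaviour of "largest word obtained by deleting some characters".
def D_largest_word (dict : List String) (str : String) : Prop :=
  ∃ i : Fin dict.length, (dict[i].toList.destutter (· ≠ ·)).Sublist str.toList ∧
    ∀ j : Fin dict.length, dict[j].toList.Sublist str.toList →
      dict[j].length < dict[i].length ∨ dict[j].length = dict[i].length ∧ i < j

instance (dict : List String) (str : String) : Decidable (D_largest_word dict str) := by
  unfold D_largest_word; infer_instance

def Spec_largest_word (dict : List String) (str : String) (out : String) : Prop :=
  ¬ D_largest_word dict str → out = largest_word_alt dict str
instance (dict : List String) (str : String) (out : String) : Decidable (Spec_largest_word dict str out) := by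
  unfold Spec_largest_word; infer_instance

def pvDiffWitness_largest_word : List String × String := (["aa"], "a")
def pvDiffWitnessOut_largest_word : String × String := ("aa", "")

-- ===== CLAIM (what is proved, stated in full; the proofs are below) =====
def Claim_unchanged_largest_word : Prop := ∀ (dict : List String) (str : String), Dom_largest_word dict str → Spec_largest_word dict str (largest_word dict str)
def Claim_changed_largest_word : Prop := Dom_largest_word (pvDiffWitness_largest_word.1) (pvDiffWitness_largest_word.2) ∧ D_largest_word (pvDiffWitness_largest_word.1) (pvDiffWitness_largest_word.2) ∧ largest_word (pvDiffWitness_largest_word.1) (pvDiffWitness_largest_word.2) = pvDiffWitnessOut_largest_word.1 ∧ largest_word_alt (pvDiffWitness_largest_word.1) (pvDiffWitness_largest_word.2) = pvDiffWitnessOut_largest_word.2 ∧ pvDiffWitnessOut_largest_word.1 ≠ pvDiffWitnessOut_largest_word.2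
def Claim_exact_largest_word : Prop := ∀ (dict : List String) (str : String), Dom_largest_word dict str → D_largest_word dict str → largest_word dict str ≠ largest_word_alt dict str

-- ===== LEMMAS AND PROOFS =====

-- clean structural form of A's two-pointer loop
def seqL : List Char → List Char → Bool
  | [], _ => true
  | _ :: _, [] => false
  | c :: cs, d :: ds => if c = d then seqL cs (d :: ds) else seqL (c :: cs) ds
termination_by w s => w.length + s.length

theorem isSequenceGo_eq (l1 l2 : List Char) (i j : Nat)
    (hi : i ≤ l1.length) (hj : j ≤ l2.length) :
    isSequenceGo l1 l2 l1.length l2.length i j = seqL (l1.drop i) (l2.drop j) := by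
  fun_induction isSequenceGo l1 l2 l1.length l2.length i j with
  | case1 i j hlt heq ih =>
    rw [List.drop_eq_getElem_cons hlt.1, List.drop_eq_getElem_cons hlt.2]
    rw [List.getD_eq_getElem _ _ hlt.1, List.getD_eq_getElem _ _ hlt.2] at heq
    rw [seqL, if_pos heq, ← List.drop_eq_getElem_cons hlt.2]
    exact ih (by omega) hj
  | case2 i j hlt heq ih =>
    rw [List.drop_eq_getElem_cons hlt.1, List.drop_eq_getElem_cons hlt.2]
    rw [List.getD_eq_getElem _ _ hlt.1, List.getD_eq_getElem _ _ hlt.2] at heq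
    rw [seqL, if_neg heq, ← List.drop_eq_getElem_cons hlt.1]
    exact ih hi (by omega)
  | case3 i j hlt =>
    by_cases hia : i = l1.length
    · subst hia; simp [List.drop_length, seqL]
    · have hi' : i < l1.length := by omega
      have hjb : j = l2.length := by omega
      subst hjb
      rw [List.drop_eq_getElem_cons hi', List.drop_length, seqL]
      simp [hia]

theorem isSequence_eq (w s : String) : isSequence w s = seqL w.toList s.toList := by
  simpa using isSequenceGo_eq w.toList s.toList 0 0 (by omega) (by omega)

theorem destutter'_head (l : List Char) (a : Char) :
    ∃ t, List.destutter' (· ≠ ·) a l = a :: t := by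
  induction l generalizing a with
  | nil => exact ⟨[], List.destutter'_nil _⟩
  | cons b l ih =>
    by_cases h : a ≠ b
    · rcases ih b with ⟨t, ht⟩
      exact ⟨List.destutter' (· ≠ ·) b l, List.destutter'_cons_pos _ h⟩
    · rw [List.destutter'_cons_neg _ h]
      exact ih a

theorem subCheck_iff (w s : List Char) : subCheck w s = true ↔ w.Sublist s := by
  fun_induction subCheck w s with
  | case1 s => simp
  | case2 c cs => simp
  | case3 cs d ds ih =>
    rw [List.cons_sublist_cons, ← ih]
  | case4 c cs d ds h ih =>
    rw [ih, List.sublist_cons_iff]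
    constructor
    · exact Or.inl
    · rintro (hs | ⟨r, hr, -⟩)
      · exact hs
      · cases hr; exact absurd rfl h

theorem seqL_iff (w s : List Char) :
    seqL w s = true ↔ (w.destutter (· ≠ ·)).Sublist s := by
  fun_induction seqL w s with
  | case1 s => simp [List.destutter]
  | case2 c cs =>
    rw [List.destutter_cons']
    rcases destutter'_head cs c with ⟨t, ht⟩
    simp [ht]
  | case3 cs c ds ih =>
    rw [ih]
    cases cs with
    | nil =>
      simp [List.destutter'_nil, List.destutter]
    | cons e t =>
      rw [List.destutter_cons', List.destutter_cons']
      by_cases hce : c ≠ e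
      · rw [List.destutter'_cons_pos _ hce]
        rcases destutter'_head t e with ⟨u, hu⟩
        rw [hu]
        constructor
        · intro hsub
          exact List.cons_sublist_cons.2 ((List.sublist_cons_iff.1 hsub).elim id
            (fun ⟨r, hr, hrs⟩ => by cases hr; exact absurd rfl hce) )
        · intro hsub
          have := List.cons_sublist_cons.1 hsub
          exact this.cons _
      · rw [not_ne_iff] at hce
        subst hce
        rw [List.destutter'_cons_neg _ (by simp)]
  | case4 c cs d ds h ih =>
    rw [ih, List.destutter_cons']
    rcases destutter'_head cs c with ⟨t, ht⟩
    rw [ht, List.sublist_cons_iff]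
    constructor
    · exact Or.inl
    · rintro (hs | ⟨r, hr, -⟩)
      · exact hs
      · cases hr; exact absurd rfl h

def bestLen (p : String → Bool) : List String → Nat
  | [] => 0
  | w :: l => if p w then max w.toList.length (bestLen p l) else bestLen p l

def firstMaxK (p : String → Bool) (K : Nat) (l : List String) : String :=
  (l.find? (fun w => w.toList.length == K && p w)).getD ""

def pickR (p : String → Bool) (l : List String) : String :=
  if bestLen p l = 0 then "" else firstMaxK p (bestLen p l) l

theorem firstMaxK_cons (p : String → Bool) (K : Nat) (x : String) (l : List String) :
    firstMaxK p K (x :: l)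
      = if (x.toList.length == K && p x) then x else firstMaxK p K l := by
  by_cases h : (x.toList.length == K && p x) = true
  · rw [if_pos h, firstMaxK,
      List.find?_cons_of_pos (p := fun w => w.toList.length == K && p w) h,
      Option.getD_some]
  · rw [if_neg h, firstMaxK, firstMaxK,
      List.find?_cons_of_neg (p := fun w => w.toList.length == K && p w)
        (by simpa using h)]

theorem bestLen_le {p : String → Bool} {l : List String} {w : String}
    (hw : w ∈ l) (hp : p w = true) : w.toList.length ≤ bestLen p l := by
  induction l with
  | nil => cases hw
  | cons x l ih =>
    rcases List.mem_cons.1 hw with h | h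
    · subst h; simp only [bestLen, hp, if_true]; exact Nat.le_max_left _ _
    · have := ih h
      by_cases hx : p x = true
      · simp only [bestLen, hx, if_true]; omega
      · have hx' : p x = false := by simpa using hx
        simp only [bestLen, hx', Bool.false_eq_true, if_false]; omega

theorem bestLen_witness {p : String → Bool} {l : List String}
    (h : bestLen p l ≠ 0) : ∃ w ∈ l, p w = true ∧ w.toList.length = bestLen p l := by
  induction l with
  | nil => simp [bestLen] at h
  | cons x l ih =>
    by_cases hx : p x = true
    · simp only [bestLen, hx, if_true] at h ⊢
      rcases Nat.le_total (bestLen p l) x.toList.length with hle | hle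
      · exact ⟨x, List.mem_cons_self, hx, (Nat.max_eq_left hle).symm⟩
      · rcases ih (by omega) with ⟨w, hw, hpw, hlen⟩
        exact ⟨w, List.mem_cons_of_mem _ hw, hpw, by omega⟩
    · have hx' : p x = false := by simpa using hx
      simp only [bestLen, hx', Bool.false_eq_true, if_false] at h ⊢
      rcases ih h with ⟨w, hw, hpw, hlen⟩
      exact ⟨w, List.mem_cons_of_mem _ hw, hpw, hlen⟩

theorem foldA_gen (str : String) (p : String → Bool)
    (hp : ∀ i, isSequence i str = p i) (l : List String) :
    ∀ st : Nat × String,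
    l.foldl
      (fun (st : Nat × String) i =>
        if st.1 < i.toList.length ∧ isSequence i str then (i.toList.length, i) else st) st
    = if st.1 < bestLen p l
      then (bestLen p l, firstMaxK p (bestLen p l) l)
      else st := by
  induction l with
  | nil => intro st; simp [bestLen]
  | cons x l ih =>
    intro st
    rw [List.foldl_cons]
    by_cases hpx : p x = true
    · by_cases hlt : st.1 < x.toList.length
      · rw [if_pos ⟨hlt, by rw [hp]; exact hpx⟩, ih]
        by_cases h2 : x.toList.length < bestLen p l
        · have hKe : bestLen p (x :: l) = bestLen p l := by
            simp only [bestLen, hpx, if_true]; omega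
          rw [if_pos h2, hKe, if_pos (by omega), firstMaxK_cons]
          have hne : (x.toList.length == bestLen p l && p x) = false := by
            simp only [Bool.and_eq_false_iff, beq_eq_false_iff_ne]; left; omega
          rw [hne, if_neg Bool.false_ne_true]
        · have hKe : bestLen p (x :: l) = x.toList.length := by
            simp only [bestLen, hpx, if_true]; omega
          rw [if_neg h2, hKe, if_pos hlt, firstMaxK_cons,
              if_pos (by simp [hpx])]
      · rw [if_neg (by intro hc; exact hlt hc.1), ih]
        by_cases h2 : st.1 < bestLen p l
        · have hKe : bestLen p (x :: l) = bestLen p l := by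
            simp only [bestLen, hpx, if_true]; omega
          rw [if_pos h2, hKe, if_pos h2, firstMaxK_cons]
          have hne : (x.toList.length == bestLen p l && p x) = false := by
            simp only [Bool.and_eq_false_iff, beq_eq_false_iff_ne]; left; omega
          rw [hne, if_neg Bool.false_ne_true]
        · have h3 : ¬ st.1 < bestLen p (x :: l) := by
            simp only [bestLen, hpx, if_true]; omega
          rw [if_neg h2, if_neg h3]
    · have hpx' : isSequence x str = false := by rw [hp]; simpa using hpx
      rw [if_neg (by rw [hpx']; rintro ⟨-, h⟩; cases h), ih]
      have hpxf : p x = false := by simpa using hpx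
      have hKe : bestLen p (x :: l) = bestLen p l := by
        simp only [bestLen, hpxf, Bool.false_eq_true, if_false]
      have hne : (x.toList.length == bestLen p l && p x) = false := by
        simp only [Bool.and_eq_false_iff]; right; simpa using hpx
      rw [hKe, firstMaxK_cons, hne, if_neg Bool.false_ne_true]

theorem A_eq (dict : List String) (str : String) :
    largest_word dict str = pickR (fun w => seqL w.toList str.toList) dict := by
  rw [largest_word, foldA_gen str _ (fun i => isSequence_eq i str), pickR]
  by_cases h : bestLen (fun w => seqL w.toList str.toList) dict = 0
  · rw [if_neg (by omega), if_pos h]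
  · rw [if_pos (by omega), if_neg h]

theorem findAt_eq (s : String) (L : Nat) (l : List String) :
    findAt l s L = l.find? (fun w => w.toList.length == L && is_subseq w s) := by
  induction l with
  | nil => rfl
  | cons x l ih =>
    by_cases hx : x.toList.length = L ∧ is_subseq x s
    · rw [findAt, if_pos hx,
        List.find?_cons_of_pos (p := fun w => w.toList.length == L && is_subseq w s)
          (by simp [hx.1, hx.2])]
    · rw [findAt, if_neg hx, ih,
        List.find?_cons_of_neg (p := fun w => w.toList.length == L && is_subseq w s)
          (by simp only [Bool.and_eq_true, beq_iff_eq]; exact hx)]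

theorem searchDown_eq (dict : List String) (s : String) (M : Nat)
    (hM : bestLen (fun w => is_subseq w s) dict ≤ M) :
    searchDown dict s M = pickR (fun w => is_subseq w s) dict := by
  induction M with
  | zero =>
    rw [searchDown, pickR, if_pos (by omega)]
  | succ L ih =>
    rw [searchDown, findAt_eq]
    cases hf : dict.find? (fun w => w.toList.length == L + 1 && is_subseq w s) with
    | some w =>
      have hmem := List.mem_of_find?_eq_some hf
      have hw := List.find?_some hf
      simp only [Bool.and_eq_true, beq_iff_eq] at hw
      have hw1 : w.toList.length = L + 1 := hw.1
      have hw2 : is_subseq w s = true := hw.2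
      have hK : bestLen (fun w => is_subseq w s) dict = L + 1 := by
        have h1 := bestLen_le (p := fun w => is_subseq w s) hmem hw2
        omega
      rw [pickR, if_neg (by omega), firstMaxK, hK, hf, Option.getD_some]
    | none =>
      have hKne : bestLen (fun w => is_subseq w s) dict ≠ L + 1 := by
        intro hK
        rcases bestLen_witness (p := fun w => is_subseq w s) (l := dict) (by omega)
          with ⟨w, hwmem, hpw, hlen⟩
        have := List.find?_eq_none.1 hf w hwmem
        simp only [Bool.and_eq_true, not_and] at this
        exact this (by simp [hlen, hK]) hpw
      exact ih (by omega)

theorem le_foldMaxLen (l : List String) : ∀ m : Nat,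
    m ≤ l.foldl (fun m w => if w.toList.length > m then w.toList.length else m) m := by
  induction l with
  | nil => intro m; simp
  | cons x l ih =>
    intro m
    rw [List.foldl_cons]
    by_cases h : x.toList.length > m
    · rw [if_pos h]; have := ih x.toList.length; omega
    · rw [if_neg h]; exact ih m

theorem bestLen_le_foldMaxLen (p : String → Bool) (l : List String) : ∀ m : Nat,
    bestLen p l ≤ l.foldl (fun m w => if w.toList.length > m then w.toList.length else m) m := by
  induction l with
  | nil => intro m; simp [bestLen]
  | cons x l ih =>
    intro m
    rw [List.foldl_cons]
    have hup : x.toList.length ≤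
        (if x.toList.length > m then x.toList.length else m) := by
      by_cases h : x.toList.length > m
      · rw [if_pos h]
      · rw [if_neg h]; omega
    have hge := le_foldMaxLen l (if x.toList.length > m then x.toList.length else m)
    by_cases hx : p x = true
    · simp only [bestLen, hx, if_true]
      have := ih (if x.toList.length > m then x.toList.length else m)
      omega
    · have hx' : p x = false := by simpa using hx
      simp only [bestLen, hx', Bool.false_eq_true, if_false]
      exact ih _

theorem B_eq (dict : List String) (str : String) :
    largest_word_alt dict str = pickR (fun w => is_subseq w str) dict := by
  rw [largest_word_alt]
  exact searchDown_eq dict str _ (bestLen_le_foldMaxLen _ dict 0)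

theorem bool_not_true {b : Bool} (h : (!b) = true) : b = false := by
  cases b
  · rfl
  · cases h

theorem is_subseq_iff (w s : String) :
    is_subseq w s = true ↔ w.toList.Sublist s.toList := by
  rw [is_subseq]; exact subCheck_iff _ _

theorem pB_imp_pA (w s : String) (h : is_subseq w s = true) :
    seqL w.toList s.toList = true := by
  rw [seqL_iff]
  exact (List.destutter_sublist _ _).trans ((is_subseq_iff w s).1 h)

theorem bestLen_mono {p q : String → Bool} (hpq : ∀ w, q w = true → p w = true)
    (l : List String) : bestLen q l ≤ bestLen p l := by
  induction l with
  | nil => simp [bestLen]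
  | cons x l ih =>
    by_cases hqx : q x = true
    · simp only [bestLen, hqx, hpq x hqx, if_true]; omega
    · have hqx' : q x = false := by simpa using hqx
      simp only [bestLen, hqx', Bool.false_eq_true, if_false]
      by_cases hpx : p x = true
      · simp only [hpx, if_true]; omega
      · have hpx' : p x = false := by simpa using hpx
        simp only [hpx', Bool.false_eq_true, if_false]; exact ih

theorem find?_ofBestLen {p : String → Bool} {l : List String}
    (h : bestLen p l ≠ 0) :
    ∃ a, l.find? (fun w => w.toList.length == bestLen p l && p w) = some a := by
  rcases bestLen_witness h with ⟨w, hmem, hpw, hlen⟩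
  have : (l.find? (fun w => w.toList.length == bestLen p l && p w)).isSome :=
    List.find?_isSome.2 ⟨w, hmem, by simp [hlen, hpw]⟩
  exact Option.isSome_iff_exists.1 this

theorem unchanged_main (dict : List String) (str : String)
    (hD : ¬ D_largest_word dict str) :
    pickR (fun w => seqL w.toList str.toList) dict
      = pickR (fun w => is_subseq w str) dict := by
  have hmono := bestLen_mono (p := fun w => seqL w.toList str.toList)
    (q := fun w => is_subseq w str) (fun w => pB_imp_pA w str) dict
  by_cases hKA : bestLen (fun w => seqL w.toList str.toList) dict = 0
  · rw [pickR, pickR, if_pos hKA, if_pos (by omega)]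
  · rcases find?_ofBestLen hKA with ⟨a, hfa⟩
    rcases List.find?_eq_some_iff_getElem.1 hfa with ⟨hpa, ia, hia, hgeta, hfirsta⟩
    simp only [Bool.and_eq_true, beq_iff_eq] at hpa
    -- a is in fact a true subsequence of str, else D_ would hold
    have hsub : a.toList.Sublist str.toList := by
      by_contra hnsub
      apply hD
      refine ⟨⟨ia, hia⟩, ?_, ?_⟩
      · show (dict[ia].toList.destutter (· ≠ ·)).Sublist str.toList
        rw [hgeta, ← seqL_iff]; exact hpa.2
      · rintro ⟨j, hj⟩ hsubj'
        have hsubj : dict[j].toList.Sublist str.toList := hsubj'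
        show dict[j].length < dict[ia].length ∨
          dict[j].length = dict[ia].length ∧ (⟨ia, hia⟩ : Fin dict.length) < ⟨j, hj⟩
        simp only [← String.length_toList]
        have hpBj : is_subseq dict[j] str = true := (is_subseq_iff _ _).2 hsubj
        have hpAj : seqL dict[j].toList str.toList = true := pB_imp_pA _ _ hpBj
        have hlej : dict[j].toList.length ≤ bestLen (fun w => seqL w.toList str.toList) dict :=
          bestLen_le (p := fun w => seqL w.toList str.toList) (List.getElem_mem hj) hpAj
        rw [hgeta]
        by_cases hl : dict[j].toList.length < a.toList.length
        · exact Or.inl hl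
        · have hlenj : dict[j].toList.length = a.toList.length := by omega
          refine Or.inr ⟨hlenj, ?_⟩
          show ia < j
          rcases lt_trichotomy j ia with hlt | heq | hgt
          · exfalso
            have hc := bool_not_true (hfirsta j hlt)
            simp only [Bool.and_eq_false_iff, beq_eq_false_iff_ne] at hc
            rcases hc with hc | hc
            · omega
            · rw [hpAj] at hc; cases hc
          · exfalso; subst heq; rw [hgeta] at hsubj; exact hnsub hsubj
          · exact hgt
    have hpBa : is_subseq a str = true := (is_subseq_iff _ _).2 hsub
    have hKB : bestLen (fun w => is_subseq w str) dict
        = bestLen (fun w => seqL w.toList str.toList) dict := by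
      have hge : a.toList.length ≤ bestLen (fun w => is_subseq w str) dict :=
        bestLen_le (p := fun w => is_subseq w str)
          (hgeta ▸ List.getElem_mem hia) hpBa
      omega
    rcases find?_ofBestLen (p := fun w => is_subseq w str) (l := dict) (by omega)
      with ⟨b, hfb⟩
    rcases List.find?_eq_some_iff_getElem.1 hfb with ⟨hpb, ib, hib, hgetb, hfirstb⟩
    simp only [Bool.and_eq_true, beq_iff_eq] at hpb
    have hab : a = b := by
      rcases lt_trichotomy ia ib with hlt | heq | hgt
      · exfalso
        have hc := bool_not_true (hfirstb ia hlt)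
        simp only [Bool.and_eq_false_iff, beq_eq_false_iff_ne] at hc
        rcases hc with hc | hc
        · rw [hgeta] at hc; omega
        · rw [hgeta, hpBa] at hc; cases hc
      · subst heq; rw [← hgeta, ← hgetb]
      · exfalso
        have hpAb : seqL b.toList str.toList = true := pB_imp_pA _ _ hpb.2
        have hc := bool_not_true (hfirsta ib hgt)
        simp only [Bool.and_eq_false_iff, beq_eq_false_iff_ne] at hc
        rcases hc with hc | hc
        · rw [hgetb] at hc; omega
        · rw [hgetb, hpAb] at hc; cases hc
    rw [pickR, pickR, if_neg hKA, if_neg (by omega), firstMaxK, firstMaxK, hfa,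
      hfb, hab]

theorem exact_main (dict : List String) (str : String)
    (hD : D_largest_word dict str) :
    pickR (fun w => seqL w.toList str.toList) dict
      ≠ pickR (fun w => is_subseq w str) dict := by
  rcases hD with ⟨⟨i, hi⟩, hreuse, hbeats⟩
  have hpAw : seqL dict[i].toList str.toList = true := (seqL_iff _ _).2 hreuse
  have hnsub : ¬ dict[i].toList.Sublist str.toList := by
    intro hs
    rcases hbeats ⟨i, hi⟩ hs with h | ⟨-, hlt⟩
    · exact absurd (h :
        dict[i].length < dict[i].length) (lt_irrefl _)
    · exact absurd hlt (lt_irrefl _)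
  have hwlen : dict[i].toList.length ≠ 0 := by
    intro h0
    exact hnsub (by
      have h1 : dict[i].toList = [] := List.length_eq_zero_iff.1 h0
      rw [h1]; exact List.nil_sublist _)
  have hleK := bestLen_le (p := fun w => seqL w.toList str.toList)
    (List.getElem_mem hi) hpAw
  have hKA : bestLen (fun w => seqL w.toList str.toList) dict ≠ 0 := by omega
  rcases find?_ofBestLen hKA with ⟨a, hfa⟩
  rcases List.find?_eq_some_iff_getElem.1 hfa with ⟨hpa, ia, hia, hgeta, hfirsta⟩
  simp only [Bool.and_eq_true, beq_iff_eq] at hpa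
  have hlena : dict[i].toList.length ≤ a.toList.length := by omega
  rw [pickR, pickR, if_neg hKA, firstMaxK, hfa, Option.getD_some]
  by_cases hKB : bestLen (fun w => is_subseq w str) dict = 0
  · rw [if_pos hKB]
    intro hcon
    rw [hcon] at hpa
    have h0 : ("" : String).toList.length = 0 := rfl
    omega
  · rw [if_neg hKB, firstMaxK]
    rcases find?_ofBestLen (p := fun w => is_subseq w str) (l := dict) hKB
      with ⟨b, hfb⟩
    rcases List.find?_eq_some_iff_getElem.1 hfb with ⟨hpb, ib, hib, hgetb, hfirstb⟩
    simp only [Bool.and_eq_true, beq_iff_eq] at hpb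
    rw [hfb, Option.getD_some]
    intro hab
    -- then a itself is a true subsequence, and the D_ witness beats it: contradiction
    have hsuba : a.toList.Sublist str.toList := by
      rw [hab]; exact (is_subseq_iff _ _).1 hpb.2
    have hthis0 := hbeats ⟨ia, hia⟩ (by rw [← hgeta] at hsuba; exact hsuba)
    have hthis : a.length < dict[i].length ∨
        a.length = dict[i].length ∧ i < ia := by
      rw [← hgeta]; exact hthis0
    simp only [← String.length_toList] at hthis
    rcases hthis with hlt | ⟨heq, hilt⟩
    · omega
    · have hc := bool_not_true (hfirsta i hilt)
      simp only [Bool.and_eq_false_iff, beq_eq_false_iff_ne] at hc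
      rcases hc with hc | hc
      · omega
      · rw [hpAw] at hc; cases hc

-- ===== VERDICT (by name: the statement is the Claim_ definition above) =====
theorem largest_word_spec : Claim_unchanged_largest_word := by
  intro dict str _ hD
  rw [A_eq, B_eq]
  exact unchanged_main dict str hD

theorem largest_word_changed : Claim_changed_largest_word := by
  unfold Claim_changed_largest_word
  refine ⟨by decide, by decide, ?_, by decide, by decide⟩
  have hseq : isSequence "aa" "a" = true := by
    rw [isSequence_eq]; exact (seqL_iff _ _).2 (by decide)
  show largest_word ["aa"] "a" = "aa"
  rw [largest_word, List.foldl_cons, List.foldl_nil, if_pos ⟨by decide, hseq⟩]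

theorem largest_word_tight : Claim_exact_largest_word := by
  intro dict str _ hD
  rw [A_eq, B_eq]
  exact exact_main dict str hD
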